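-- pv_equiv track=rewrite | github.com/pypi-data/pypi-mirror-370 | packages/nmicheck/nmicheck-0.3.0.tar.gz/nmicheck-0.3.0/nmicheck/participant.py | nmi_participant
-- ===== SOURCE A (Python) =====
-- PARTICIPANT_PREFIXES = {
--     "2001": "UMPLP",
--     "2102": "ETSATP",
--     "2500": "PWCLNSP",
--     "2503": "PWCLNSP",
--     "30": "ERGONETP",
--     "31": "ENERGEXP",
--     "3202": "PLINKP",
--     "4001": "CNRGYP",
--     "4102": "ENERGYAP",
--     "4204": "CNRGYP",
--     "4310": "INTEGP",
--     "4407": "CNRGYP",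
--     "4508": "CNRGYP",
--     "4608": "TRANSGP",
--     "6001": "SOLARISP",
--     "6102": "CITIPP",
--     "6203": "POWCP",
--     "6305": "EASTERN",
--     "6407": "UNITED",
--     "6509": "GPUPP",
--     "7001": "ACTEWP",
--     "8000": "AURORAP",
--     "8590": "AURORAP",
--     "NAAA": "CNRGYP",
--     "NBBB": "CNRGYP",
--     "NCCC": "ENERGYAP",
--     "NDDD": "CNRGYP",
--     "NEEE": "INTEGP",
--     "NFFF": "CNRGYP",
--     "NGGG": "ACTEWP",
--     "NTTT": "TRANSGP",
--     "QAAA": "ERGONETP",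
--     "QB": "ENERGEXP",
--     "QCCC": "ERGONETP",
--     "QDDD": "ERGONETP",
--     "QEEE": "ERGONETP",
--     "QFFF": "ERGONETP",
--     "QGGG": "ERGONETP",
--     "SAAA": "UMPLP",
--     "SASMPL": "UMPLP",
--     "T00000": "AURORAP",
--     "VAAA": "CITIPP",
--     "VBBB": "EASTERN",
--     "VCCC": "POWCP",
--     "VDDD": "SOLARISP",
--     "VEEE": "UNITED",
-- }
--
-- TNI_PREFIXES = {
--     "Q": "PLINKP",
--     "A": "ACTEWP",
--     "S": "ETSATP",
--     "T": "TRANSEND",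
--     "V": "GPUPP",
-- }
--
-- def nmi_participant(nmi: str) -> str | None:
--     """Attempt to determine the partipant associated with the NMI"""
--     nmi = nmi.upper().strip()  # Normalize input
--
--     # Check if W is 5th character and associate to TNSP
--     if nmi[4] == "W":
--         for prefix in TNI_PREFIXES:
--             if nmi.startswith(prefix):
--                 return TNI_PREFIXES[prefix]
--
--     # Check for DNSP
--     for prefix in PARTICIPANT_PREFIXES:
--         if nmi.startswith(prefix):
--             return PARTICIPANT_PREFIXES[prefix]
--
--     # Could not match
--     return None
-- ===== SOURCE B (Python) =====
-- # Compact table encoded as one whitespace-separated string, parsed at import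
-- # time into dicts; lookup probes the dicts at the only key lengths present
-- # (1 for TNI; 2, 4, 6 for participants) instead of scanning every key with
-- # startswith.  No key is a prefix of another, so at most one probe can hit.
--
-- _PARTICIPANT_DATA = """
-- 2001=UMPLP 2102=ETSATP 2500=PWCLNSP 2503=PWCLNSP 30=ERGONETP 31=ENERGEXP
-- 3202=PLINKP 4001=CNRGYP 4102=ENERGYAP 4204=CNRGYP 4310=INTEGP 4407=CNRGYP
-- 4508=CNRGYP 4608=TRANSGP 6001=SOLARISP 6102=CITIPP 6203=POWCP 6305=EASTERN
-- 6407=UNITED 6509=GPUPP 7001=ACTEWP 8000=AURORAP 8590=AURORAP NAAA=CNRGYP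
-- NBBB=CNRGYP NCCC=ENERGYAP NDDD=CNRGYP NEEE=INTEGP NFFF=CNRGYP NGGG=ACTEWP
-- NTTT=TRANSGP QAAA=ERGONETP QB=ENERGEXP QCCC=ERGONETP QDDD=ERGONETP
-- QEEE=ERGONETP QFFF=ERGONETP QGGG=ERGONETP SAAA=UMPLP SASMPL=UMPLP
-- T00000=AURORAP VAAA=CITIPP VBBB=EASTERN VCCC=POWCP VDDD=SOLARISP VEEE=UNITED
-- """
--
-- _TNI_DATA = "Q=PLINKP A=ACTEWP S=ETSATP T=TRANSEND V=GPUPP"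
--
-- PARTICIPANT_PREFIXES = dict(item.split("=") for item in _PARTICIPANT_DATA.split())
-- TNI_PREFIXES = dict(item.split("=") for item in _TNI_DATA.split())
--
--
-- def nmi_participant(nmi: str) -> str | None:
--     """Attempt to determine the participant associated with the NMI."""
--     nmi = nmi.upper().strip()  # Normalize input
--
--     if nmi[4] == "W":
--         participant = TNI_PREFIXES.get(nmi[:1])
--         if participant is not None:
--             return participant
--
--     for n in (2, 4, 6):
--         participant = PARTICIPANT_PREFIXES.get(nmi[:n])
--         if participant is not None:
--             return participant
--
--     return None
-- ===== Notes on version B (the rewrite author's own statement) =====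
-- stated objective: alternative
-- what changed: B stores the prefix tables as one compact whitespace-separated string of equals-sign pairs parsed into dicts at import time, and replaces A's startswith scan over all 51 dict keys with direct dict probes of the normalized NMI's prefixes at the only key lengths present (1 for TNI; 2, 4, 6 for participants); prefix-freeness of the key sets makes the probes equivalent to A's first-match scan.
-- outside the precondition, e.g. on nmi_participant('NMI'): A raises IndexError, B raises IndexError
import Mathlib
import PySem

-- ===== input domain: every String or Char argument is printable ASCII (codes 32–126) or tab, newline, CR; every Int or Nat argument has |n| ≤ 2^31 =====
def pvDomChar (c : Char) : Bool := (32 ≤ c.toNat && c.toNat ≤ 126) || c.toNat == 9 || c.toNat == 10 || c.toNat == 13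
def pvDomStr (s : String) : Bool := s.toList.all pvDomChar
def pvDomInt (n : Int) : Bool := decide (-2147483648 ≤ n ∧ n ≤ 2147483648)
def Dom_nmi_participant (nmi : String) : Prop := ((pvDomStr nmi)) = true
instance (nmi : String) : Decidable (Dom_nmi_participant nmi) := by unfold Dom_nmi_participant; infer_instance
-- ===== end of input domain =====

-- B stores the tables as one compact string parsed at import time and replaces A's
-- startswith scan over every key by direct dict probes at the only key lengths present.

-- ===== PORT A =====

-- A's module-level dicts, as insertion-ordered association lists
def participantPrefixes : List (String × String) :=
  [("2001", "UMPLP"), ("2102", "ETSATP"), ("2500", "PWCLNSP"), ("2503", "PWCLNSP"),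
   ("30", "ERGONETP"), ("31", "ENERGEXP"), ("3202", "PLINKP"), ("4001", "CNRGYP"),
   ("4102", "ENERGYAP"), ("4204", "CNRGYP"), ("4310", "INTEGP"), ("4407", "CNRGYP"),
   ("4508", "CNRGYP"), ("4608", "TRANSGP"), ("6001", "SOLARISP"), ("6102", "CITIPP"),
   ("6203", "POWCP"), ("6305", "EASTERN"), ("6407", "UNITED"), ("6509", "GPUPP"),
   ("7001", "ACTEWP"), ("8000", "AURORAP"), ("8590", "AURORAP"), ("NAAA", "CNRGYP"),
   ("NBBB", "CNRGYP"), ("NCCC", "ENERGYAP"), ("NDDD", "CNRGYP"), ("NEEE", "INTEGP"),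
   ("NFFF", "CNRGYP"), ("NGGG", "ACTEWP"), ("NTTT", "TRANSGP"), ("QAAA", "ERGONETP"),
   ("QB", "ENERGEXP"), ("QCCC", "ERGONETP"), ("QDDD", "ERGONETP"), ("QEEE", "ERGONETP"),
   ("QFFF", "ERGONETP"), ("QGGG", "ERGONETP"), ("SAAA", "UMPLP"), ("SASMPL", "UMPLP"),
   ("T00000", "AURORAP"), ("VAAA", "CITIPP"), ("VBBB", "EASTERN"), ("VCCC", "POWCP"),
   ("VDDD", "SOLARISP"), ("VEEE", "UNITED")]

def tniPrefixes : List (String × String) :=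
  [("Q", "PLINKP"), ("A", "ACTEWP"), ("S", "ETSATP"), ("T", "TRANSEND"), ("V", "GPUPP")]

-- A's loop: 'for prefix in D: if nmi.startswith(prefix): return D[prefix]'
def scanPrefixes (s : String) : List (String × String) → Option String
  | [] => none
  | (k, v) :: rest => if PySem.Str.startswith s k then some v else scanPrefixes s rest

def nmi_participant (nmi : String) : Option String :=
  let s := PySem.Str.strip (PySem.Str.upper nmi)
  match PySem.Str.pyGet? s 4 with
  | none => none  -- nmi[4] raises IndexError: excluded by Pre_
  | some c =>
    match (if c == 'W' then scanPrefixes s tniPrefixes else none) with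
    | some v => some v
    | none => scanPrefixes s participantPrefixes

-- ===== PORT B =====

-- B's _PARTICIPANT_DATA / _TNI_DATA module constants
def participantData : String :=
"
2001=UMPLP 2102=ETSATP 2500=PWCLNSP 2503=PWCLNSP 30=ERGONETP 31=ENERGEXP
3202=PLINKP 4001=CNRGYP 4102=ENERGYAP 4204=CNRGYP 4310=INTEGP 4407=CNRGYP
4508=CNRGYP 4608=TRANSGP 6001=SOLARISP 6102=CITIPP 6203=POWCP 6305=EASTERN
6407=UNITED 6509=GPUPP 7001=ACTEWP 8000=AURORAP 8590=AURORAP NAAA=CNRGYP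
NBBB=CNRGYP NCCC=ENERGYAP NDDD=CNRGYP NEEE=INTEGP NFFF=CNRGYP NGGG=ACTEWP
NTTT=TRANSGP QAAA=ERGONETP QB=ENERGEXP QCCC=ERGONETP QDDD=ERGONETP
QEEE=ERGONETP QFFF=ERGONETP QGGG=ERGONETP SAAA=UMPLP SASMPL=UMPLP
T00000=AURORAP VAAA=CITIPP VBBB=EASTERN VCCC=POWCP VDDD=SOLARISP VEEE=UNITED
"

def tniData : String := "Q=PLINKP A=ACTEWP S=ETSATP T=TRANSEND V=GPUPP"

-- 'item.split("=")' turned into a key/value pair (dict() raises on anything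
-- other than a 2-element split; unreachable on this module data)
def pairOfItem (item : String) : String × String :=
  match PySem.Str.split? item "=" with
  | some [k, v] => (k, v)
  | _ => ("", "")

-- 'dict(item.split("=") for item in DATA.split())'
def parseTable (data : String) : PySem.Dict String String :=
  PySem.Dict.mk ((PySem.Str.split₀ data).map pairOfItem)

def participantDict : PySem.Dict String String := parseTable participantData
def tniDict : PySem.Dict String String := parseTable tniData

-- B's loop: 'for n in (2, 4, 6): v = D.get(s[:n]); if v is not None: return v'
def probeLens (d : PySem.Dict String String) (s : String) : List Nat → Option String
  | [] => none
  | n :: ns =>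
    match d.get? (PySem.Str.slice s none (some (n : Int))) with
    | some v => some v
    | none => probeLens d s ns

def nmi_participant_alt (nmi : String) : Option String :=
  let s := PySem.Str.strip (PySem.Str.upper nmi)
  match PySem.Str.pyGet? s 4 with
  | none => none  -- s[4] raises IndexError: excluded by Pre_
  | some c =>
    match (if c == 'W' then tniDict.get? (PySem.Str.slice s none (some 1)) else none) with
    | some v => some v
    | none => probeLens participantDict s [2, 4, 6]

-- ===== PRECONDITION & SPEC =====
-- Pre_ excludes exactly the inputs on which A raises IndexError at nmi[4]
-- (normalized string shorter than 5 characters); B raises there too.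
def Pre_nmi_participant (nmi : String) : Prop :=
  5 ≤ (PySem.Chars.strip (PySem.Chars.upper nmi.toList)).length

instance (nmi : String) : Decidable (Pre_nmi_participant nmi) := by
  unfold Pre_nmi_participant; infer_instance

def pvWitness_nmi_participant : String := "NAAA123"

def Spec_nmi_participant (nmi : String) (out : Option String) : Prop := out = nmi_participant_alt nmi
instance (nmi : String) (out : Option String) : Decidable (Spec_nmi_participant nmi out) := by unfold Spec_nmi_participant; infer_instance

-- ===== CLAIM (what is proved, stated in full; the proofs are below) =====
def Claim_equal_nmi_participant : Prop := ∀ (nmi : String), Dom_nmi_participant nmi → Pre_nmi_participant nmi → Spec_nmi_participant nmi (nmi_participant nmi)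

-- ===== LEMMAS AND PROOFS =====

-- B's parsed tables are exactly A's literal association lists
set_option maxRecDepth 100000 in
set_option maxHeartbeats 2000000 in
theorem parse_participant : parseTable participantData = PySem.Dict.mk participantPrefixes := by decide

set_option maxRecDepth 100000 in
set_option maxHeartbeats 2000000 in
theorem parse_tni : parseTable tniData = PySem.Dict.mk tniPrefixes := by decide

-- A's scan is the first key (in insertion order) that is a prefix of s
theorem scanPrefixes_eq_find (s : String) (L : List (String × String)) :
    scanPrefixes s L = (L.find? (fun p => PySem.Str.startswith s p.1)).map (·.2) := by
  induction L with
  | nil => rfl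
  | cons p rest ih =>
    obtain ⟨k, v⟩ := p
    simp only [scanPrefixes, List.find?_cons]
    cases h : PySem.Chars.startswith s.toList k.toList with
    | true => simp [PySem.Str.startswith, h]
    | false => simp [PySem.Str.startswith, h, ih]

-- a dict hit at s[:n] names a key that is a prefix of s
theorem key_of_get?_take (s : String) (L : List (String × String)) (n : Int) (hn : 0 ≤ n)
    (q : String × String)
    (hq : L.find? (fun p => p.1 == PySem.Str.slice s none (some n)) = some q) :
    q ∈ L ∧ q.1.toList <+: s.toList := by
  refine ⟨List.mem_of_find?_eq_some hq, ?_⟩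
  have h1 := List.find?_some hq
  have h2 : q.1 = PySem.Str.slice s none (some n) := by simpa using h1
  have h3 : q.1.toList = s.toList.take n.toNat := by
    rw [h2, PySem.Str.toList_slice, PySem.Chars.slice_eq_listSlice,
        PySem.List.slice_to _ hn]
  rw [h3]
  exact List.take_prefix _ _

-- if no key is a prefix of s, every probe misses
theorem get?_take_none (s : String) (L : List (String × String)) (n : Int) (hn : 0 ≤ n)
    (hnone : L.find? (fun p => PySem.Str.startswith s p.1) = none) :
    (PySem.Dict.mk L).get? (PySem.Str.slice s none (some n)) = none := by
  cases hf : L.find? (fun p => p.1 == PySem.Str.slice s none (some n)) with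
  | none => simp [PySem.Dict.get?, hf]
  | some q =>
    obtain ⟨hmem, hpre⟩ := key_of_get?_take s L n hn q hf
    have := List.find?_eq_none.mp hnone q hmem
    simp [PySem.Str.startswith, PySem.Chars.startswith_iff, hpre] at this

-- with prefix-free keys, any probe that hits returns the scanned value
theorem get?_take_of_find (s : String) (L : List (String × String))
    (hpf : ∀ a ∈ L, ∀ b ∈ L, a.1.toList <+: b.1.toList → a = b)
    (p : String × String)
    (hfind : L.find? (fun q => PySem.Str.startswith s q.1) = some p)
    (n : Int) (hn : 0 ≤ n) :
    (PySem.Dict.mk L).get? (PySem.Str.slice s none (some n)) = none ∨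
    (PySem.Dict.mk L).get? (PySem.Str.slice s none (some n)) = some p.2 := by
  cases hf : L.find? (fun q => q.1 == PySem.Str.slice s none (some n)) with
  | none => left; simp [PySem.Dict.get?, hf]
  | some q =>
    right
    obtain ⟨hqmem, hqpre⟩ := key_of_get?_take s L n hn q hf
    have hpmem : p ∈ L := List.mem_of_find?_eq_some hfind
    have hppre : p.1.toList <+: s.toList := by
      have := List.find?_some hfind
      simpa [PySem.Str.startswith, PySem.Chars.startswith_iff] using this
    have hqp : q = p := by
      rcases List.prefix_or_prefix_of_prefix hqpre hppre with h | h
      · exact hpf q hqmem p hpmem h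
      · exact (hpf p hpmem q hqmem h).symm
    simp [PySem.Dict.get?, hf, hqp]

-- the probe at the found key's own length cannot miss
theorem get?_take_self (s : String) (L : List (String × String))
    (p : String × String)
    (hfind : L.find? (fun q => PySem.Str.startswith s q.1) = some p) :
    (PySem.Dict.mk L).get? (PySem.Str.slice s none (some (p.1.toList.length : Int))) ≠ none := by
  have hpmem : p ∈ L := List.mem_of_find?_eq_some hfind
  have hppre : p.1.toList <+: s.toList := by
    have := List.find?_some hfind
    simpa [PySem.Str.startswith, PySem.Chars.startswith_iff] using this
  have hslice : PySem.Str.slice s none (some (p.1.toList.length : Int)) = p.1 := by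
    have h1 : (PySem.Str.slice s none (some (p.1.toList.length : Int))).toList
        = s.toList.take p.1.toList.length := by
      rw [PySem.Str.toList_slice, PySem.Chars.slice_eq_listSlice,
          PySem.List.slice_to_natCast]
    have h2 : p.1.toList = s.toList.take p.1.toList.length :=
      List.prefix_iff_eq_take.mp hppre
    apply String.toList_injective
    rw [h1, ← h2]
  rw [hslice]
  cases hf : L.find? (fun q => q.1 == p.1) with
  | none =>
    exact absurd (by simp : (fun q => q.1 == p.1) p = true)
      (List.find?_eq_none.mp hf p hpmem)
  | some q => simp [PySem.Dict.get?, hf]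

-- the probe chain returns exactly what A's scan returns, as long as every key
-- length occurs among the probed lengths and the keys are prefix-free
theorem probeLens_eq_scan (s : String) (L : List (String × String)) (ns : List Nat)
    (hpf : ∀ a ∈ L, ∀ b ∈ L, a.1.toList <+: b.1.toList → a = b)
    (hlen : ∀ p ∈ L, p.1.toList.length ∈ ns) :
    probeLens (PySem.Dict.mk L) s ns = scanPrefixes s L := by
  rw [scanPrefixes_eq_find]
  cases hfind : L.find? (fun p => PySem.Str.startswith s p.1) with
  | none =>
    simp only [Option.map_none]
    clear hlen
    induction ns with
    | nil => rfl
    | cons n ns ih =>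
      simp only [probeLens, get?_take_none s L (n : Int) (by positivity) hfind, ih]
  | some p =>
    simp only [Option.map_some]
    have hmem : p.1.toList.length ∈ ns := hlen p (List.mem_of_find?_eq_some hfind)
    clear hlen
    induction ns with
    | nil => cases hmem
    | cons n ns ih =>
      simp only [probeLens]
      cases hget : (PySem.Dict.mk L).get? (PySem.Str.slice s none (some (n : Int))) with
      | some v =>
        rcases get?_take_of_find s L hpf p hfind (n : Int) (by positivity) with h | h
        · rw [hget] at h; cases h
        · rw [hget] at h; exact h
      | none =>
        have hne : p.1.toList.length ≠ n := by
          intro h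
          apply get?_take_self s L p hfind
          rw [h]; exact hget
        have h : p.1.toList.length ∈ ns := by
          rcases List.mem_cons.mp hmem with h' | h'
          · exact absurd h' hne
          · exact h'
        exact ih h

-- concrete facts about the two key sets
theorem participant_pf : ∀ a ∈ participantPrefixes, ∀ b ∈ participantPrefixes,
    a.1.toList <+: b.1.toList → a = b := by decide

theorem participant_lens : ∀ p ∈ participantPrefixes, p.1.toList.length ∈ [2, 4, 6] := by decide

theorem tni_pf : ∀ a ∈ tniPrefixes, ∀ b ∈ tniPrefixes,
    a.1.toList <+: b.1.toList → a = b := by decide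

theorem tni_lens : ∀ p ∈ tniPrefixes, p.1.toList.length ∈ [1] := by decide

-- the two branch computations agree on every string s
theorem participant_branch (s : String) :
    probeLens participantDict s [2, 4, 6] = scanPrefixes s participantPrefixes := by
  rw [show participantDict = PySem.Dict.mk participantPrefixes from parse_participant]
  exact probeLens_eq_scan s participantPrefixes [2, 4, 6] participant_pf participant_lens

theorem tni_branch (s : String) :
    tniDict.get? (PySem.Str.slice s none (some 1)) = scanPrefixes s tniPrefixes := by
  have h := probeLens_eq_scan s tniPrefixes [1] tni_pf tni_lens
  simp only [probeLens, Nat.cast_one] at h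
  rw [show tniDict = PySem.Dict.mk tniPrefixes from parse_tni, ← h]
  cases (PySem.Dict.mk tniPrefixes).get? (PySem.Str.slice s none (some 1)) <;> simp

-- ===== VERDICT (by name: the statement is the Claim_ definition above) =====
theorem nmi_participant_spec : Claim_equal_nmi_participant := by
  intro nmi _ _
  unfold Spec_nmi_participant
  show nmi_participant nmi = nmi_participant_alt nmi
  unfold nmi_participant nmi_participant_alt
  simp only [← participant_branch, ← tni_branch]
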